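-- pv_equiv track=rewrite | github.com/r00texploit/udressgpt | actions/write_flutter_tests.py | _get_required_test_files
-- ===== SOURCE A (Python) =====
-- from typing import Dict, Any, List
--
-- def _get_required_test_files(test_type: str, source_files: List[str]) -> List[str]:
--     """Get the list of required test files based on test type and source files.
--
--     Args:
--         test_type: Type of tests to generate (all, widget, unit, integration)
--         source_files: List of source files to test
--
--     Returns:
--         List of required test file paths
--     """
--     required_files = []
--
--     if test_type in ["all", "widget"]:
--         # Add widget tests
--         for source_file in source_files:
--             if source_file.endswith(".dart") and "widget" in source_file.lower():
--                 test_file = source_file.replace("lib/", "test/").replace(".dart", "_test.dart")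
--                 required_files.append(test_file)
--
--     if test_type in ["all", "unit"]:
--         # Add unit tests
--         for source_file in source_files:
--             if source_file.endswith(".dart") and "widget" not in source_file.lower():
--                 test_file = source_file.replace("lib/", "test/").replace(".dart", "_test.dart")
--                 required_files.append(test_file)
--
--     if test_type in ["all", "integration"]:
--         # Add integration tests
--         required_files.append("integration_test/app_test.dart")
--
--     return required_files
-- ===== SOURCE B (Python) =====
-- def _get_required_test_files(test_type, source_files):
--     # One pass: partition .dart sources into widget/unit buckets (already transformed),
--     # then assemble the result from the buckets.
--     widget_tests = []
--     unit_tests = []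
--     for f in source_files:
--         if not f.endswith(".dart"):
--             continue
--         t = f.replace("lib/", "test/").replace(".dart", "_test.dart")
--         if "widget" in f.lower():
--             widget_tests.append(t)
--         else:
--             unit_tests.append(t)
--     required = []
--     if test_type in ("all", "widget"):
--         required += widget_tests
--     if test_type in ("all", "unit"):
--         required += unit_tests
--     if test_type in ("all", "integration"):
--         required.append("integration_test/app_test.dart")
--     return required
-- ===== Notes on version B (the rewrite author's own statement) =====
-- stated objective: simpler
-- what changed: Replaces A's two separate filtered passes over source_files by a single pass that partitions the transformed .dart paths into widget/unit buckets, then assembles the result from the buckets.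
import Mathlib
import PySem

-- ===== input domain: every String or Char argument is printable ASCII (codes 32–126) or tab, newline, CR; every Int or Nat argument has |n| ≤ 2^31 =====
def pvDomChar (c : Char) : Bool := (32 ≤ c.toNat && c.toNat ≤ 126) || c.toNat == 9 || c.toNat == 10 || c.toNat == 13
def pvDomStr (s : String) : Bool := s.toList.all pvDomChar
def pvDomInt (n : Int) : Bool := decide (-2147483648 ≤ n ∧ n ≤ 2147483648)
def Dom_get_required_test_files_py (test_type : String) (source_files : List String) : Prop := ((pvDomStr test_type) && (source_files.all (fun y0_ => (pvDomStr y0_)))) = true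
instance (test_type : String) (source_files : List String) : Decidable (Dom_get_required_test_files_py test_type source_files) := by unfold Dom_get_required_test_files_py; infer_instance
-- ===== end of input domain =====

-- B restructures A's two filtered passes over source_files into one partitioning pass
-- over the transformed .dart paths (objective: simpler, one traversal instead of two).

-- shared string transform: f.replace("lib/", "test/").replace(".dart", "_test.dart")
def pvTransform (s : String) : String :=
  PySem.Str.replace (PySem.Str.replace s "lib/" "test/") ".dart" "_test.dart"

-- ===== PORT A =====
def get_required_test_files_py (test_type : String) (source_files : List String) : List String :=
  let required_files : List String := []
  let required_files :=
    if test_type ∈ (["all", "widget"] : List String) then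
      source_files.foldl (fun acc s =>
        if PySem.Str.endswith s ".dart" && PySem.Str.isIn "widget" (PySem.Str.lower s) then
          acc ++ [pvTransform s]
        else acc) required_files
    else required_files
  let required_files :=
    if test_type ∈ (["all", "unit"] : List String) then
      source_files.foldl (fun acc s =>
        if PySem.Str.endswith s ".dart" && !PySem.Str.isIn "widget" (PySem.Str.lower s) then
          acc ++ [pvTransform s]
        else acc) required_files
    else required_files
  let required_files :=
    if test_type ∈ (["all", "integration"] : List String) then
      required_files ++ ["integration_test/app_test.dart"]
    else required_files
  required_files

-- ===== PORT B =====
-- one pass: partition transformed .dart paths into (widget_tests, unit_tests)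
def pvStep (p : List String × List String) (s : String) : List String × List String :=
  if !PySem.Str.endswith s ".dart" then p
  else
    let t := pvTransform s
    if PySem.Str.isIn "widget" (PySem.Str.lower s) then (p.1 ++ [t], p.2)
    else (p.1, p.2 ++ [t])

def get_required_test_files_py_alt (test_type : String) (source_files : List String) : List String :=
  let buckets := source_files.foldl pvStep ([], [])
  let required := if test_type ∈ (["all", "widget"] : List String) then buckets.1 else []
  let required := if test_type ∈ (["all", "unit"] : List String) then required ++ buckets.2 else required
  if test_type ∈ (["all", "integration"] : List String) then
    required ++ ["integration_test/app_test.dart"]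
  else required

-- ===== PRECONDITION & SPEC =====
def Spec_get_required_test_files_py (test_type : String) (source_files : List String) (out : List String) : Prop := out = get_required_test_files_py_alt test_type source_files
instance (test_type : String) (source_files : List String) (out : List String) : Decidable (Spec_get_required_test_files_py test_type source_files out) := by unfold Spec_get_required_test_files_py; infer_instance

-- ===== CLAIM (what is proved, stated in full; the proofs are below) =====
def Claim_equal_get_required_test_files_py : Prop := ∀ (test_type : String) (source_files : List String), Dom_get_required_test_files_py test_type source_files → Spec_get_required_test_files_py test_type source_files (get_required_test_files_py test_type source_files)

-- ===== LEMMAS AND PROOFS =====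

-- B's single partitioning pass produces exactly the two filtered·mapped buckets
lemma pvStep_foldl (sf : List String) (a b : List String) :
    sf.foldl pvStep (a, b) =
      (a ++ (sf.filter (fun s => PySem.Str.endswith s ".dart" && PySem.Str.isIn "widget" (PySem.Str.lower s))).map pvTransform,
       b ++ (sf.filter (fun s => PySem.Str.endswith s ".dart" && !PySem.Str.isIn "widget" (PySem.Str.lower s))).map pvTransform) := by
  induction sf generalizing a b with
  | nil => simp
  | cons s t ih =>
    by_cases h1 : PySem.Chars.endswith s.toList ['.', 'd', 'a', 'r', 't'] <;>
      by_cases h2 : PySem.Chars.isIn ['w', 'i', 'd', 'g', 'e', 't'] (PySem.Chars.lower s.toList) <;>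
      simp [List.foldl, pvStep, h1, h2, ih]

theorem get_required_test_files_py_spec : Claim_equal_get_required_test_files_py := by
  intro tt sf _
  show get_required_test_files_py tt sf = get_required_test_files_py_alt tt sf
  unfold get_required_test_files_py get_required_test_files_py_alt
  rw [pvStep_foldl]
  simp only [PySem.List.foldl_append_if]
  by_cases c1 : tt ∈ (["all", "widget"] : List String) <;>
    by_cases c2 : tt ∈ (["all", "unit"] : List String) <;>
    by_cases c3 : tt ∈ (["all", "integration"] : List String) <;>
    simp [c1, c2, c3]
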